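-- pv_equiv track=rewrite | github.com/pathong/CU_grader | grader65/09/9-34.py | pattern3
-- ===== SOURCE A (Python) =====
-- def pattern3(n):
--     li = []
--     curr = 0
--     for i in range(n):
--         l = []
--         for j in range(n):
--             if j >= i:
--                 curr += 1
--                 l.append(curr)
--             else:
--                 l.append(0)
--         li.append(l)
--     return li
-- ===== SOURCE B (Python) =====
-- def pattern3(n):
--     # Closed form, no running state: the ascending run of row i starts right after
--     # the i*n - i*(i-1)//2 values already placed in rows 0..i-1, so
--     # cell (i, j) = 0 if j < i else i*n - i*(i-1)//2 + (j - i) + 1.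
--     return [[0 if j < i else i * n - i * (i - 1) // 2 + j - i + 1
--              for j in range(n)]
--             for i in range(n)]
-- ===== Notes on version B (the rewrite author's own statement) =====
-- stated objective: alternative
-- what changed: Replaces A's stateful nested loops with a running counter by a stateless closed-form comprehension: each cell (i,j) is computed directly from i, j and n via the triangular-number formula i*n - i*(i-1)//2 + j - i + 1, so no counter is carried across cells or rows.
import Mathlib
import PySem

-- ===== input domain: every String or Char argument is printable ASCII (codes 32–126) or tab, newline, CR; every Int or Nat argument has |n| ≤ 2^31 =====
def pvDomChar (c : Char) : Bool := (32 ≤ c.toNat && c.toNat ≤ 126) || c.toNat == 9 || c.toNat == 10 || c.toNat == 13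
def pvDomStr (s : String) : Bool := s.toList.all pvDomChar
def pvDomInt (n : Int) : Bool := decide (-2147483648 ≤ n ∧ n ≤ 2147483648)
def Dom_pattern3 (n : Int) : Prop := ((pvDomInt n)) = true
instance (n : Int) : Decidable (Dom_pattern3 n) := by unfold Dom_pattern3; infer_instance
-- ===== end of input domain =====

-- B replaces A's stateful nested loops and running counter by a stateless per-cell
-- closed form (triangular-number formula); objective: alternative.

-- ===== PORT A =====
-- A: nested loops; outer state (li, curr), inner state (l, curr).
def pattern3 (n : Int) : List (List Int) :=
  (PySem.List.pyRange 0 n 1).foldl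
    (fun (st : List (List Int) × Int) i =>
      let inner :=
        (PySem.List.pyRange 0 n 1).foldl
          (fun (st2 : List Int × Int) j =>
            if j ≥ i then (st2.1 ++ [st2.2 + 1], st2.2 + 1)
            else (st2.1 ++ [0], st2.2))
          ([], st.2)
      (st.1 ++ [inner.1], inner.2))
    ([], 0) |>.1

-- ===== PORT B =====
-- B: nested comprehensions, no carried state; cell (i,j) by closed form.
def pattern3_alt (n : Int) : List (List Int) :=
  (PySem.List.pyRange 0 n 1).map
    (fun i =>
      (PySem.List.pyRange 0 n 1).map
        (fun j =>
          if j < i then 0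
          else i * n - PySem.Int.floordiv (i * (i - 1)) 2 + j - i + 1))

-- ===== PRECONDITION & SPEC =====
def Spec_pattern3 (n : Int) (out : List (List Int)) : Prop := out = pattern3_alt n
instance (n : Int) (out : List (List Int)) : Decidable (Spec_pattern3 n out) := by unfold Spec_pattern3; infer_instance

-- ===== CLAIM (what is proved, stated in full; the proofs are below) =====
def Claim_equal_pattern3 : Prop := ∀ (n : Int), Dom_pattern3 n → Spec_pattern3 n (pattern3 n)

-- ===== LEMMAS AND PROOFS =====

-- A's outer-loop step, named for the proofs (rfl-equal to the port's lambda).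
def pvStepA (n : Int) (st : List (List Int) × Int) (i : Int) : List (List Int) × Int :=
  let inner :=
    (PySem.List.pyRange 0 n 1).foldl
      (fun (st2 : List Int × Int) j =>
        if j ≥ i then (st2.1 ++ [st2.2 + 1], st2.2 + 1)
        else (st2.1 ++ [0], st2.2))
      ([], st.2)
  (st.1 ++ [inner.1], inner.2)

-- B's row i, named for the proofs.
def pvRowB (n i : Int) : List Int :=
  (PySem.List.pyRange 0 n 1).map
    (fun j => if j < i then 0 else i * n - PySem.Int.floordiv (i * (i - 1)) 2 + j - i + 1)

-- A's inner loop over j ∈ [a, b) with every j < i appends b - a zeros, counter unchanged.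
theorem pv_inner_zeros (i : Int) (k : Nat) :
    ∀ (a b c : Int) (acc : List Int), b ≤ i → b - a = k →
    (PySem.List.pyRange a b 1).foldl
      (fun (st2 : List Int × Int) j =>
        if j ≥ i then (st2.1 ++ [st2.2 + 1], st2.2 + 1) else (st2.1 ++ [0], st2.2))
      (acc, c)
    = (acc ++ List.replicate k 0, c) := by
  induction k with
  | zero =>
    intro a b c acc _ hk
    rw [PySem.List.pyRange_one_eq_nil (by omega)]
    simp
  | succ m ih =>
    intro a b c acc hb hk
    rw [PySem.List.pyRange_one_cons (a := a) (b := b) (by push_cast at hk; omega), List.foldl_cons]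
    rw [if_neg (show ¬ a ≥ i by push_cast at hk; omega)]
    rw [ih (a + 1) b c (acc ++ [0]) hb (by push_cast at hk ⊢; omega)]
    simp [List.replicate_succ]

-- A's inner loop over j ∈ [a, b) with i ≤ a appends c+1, …, c+(b-a); counter becomes c+(b-a).
theorem pv_inner_run (i : Int) (k : Nat) :
    ∀ (a b c : Int) (acc : List Int), i ≤ a → b - a = k →
    (PySem.List.pyRange a b 1).foldl
      (fun (st2 : List Int × Int) j =>
        if j ≥ i then (st2.1 ++ [st2.2 + 1], st2.2 + 1) else (st2.1 ++ [0], st2.2))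
      (acc, c)
    = (acc ++ PySem.List.pyRange (c + 1) (c + 1 + k) 1, c + k) := by
  induction k with
  | zero =>
    intro a b c acc _ hk
    rw [PySem.List.pyRange_one_eq_nil (by omega),
        PySem.List.pyRange_one_eq_nil (by push_cast; omega)]
    simp
  | succ m ih =>
    intro a b c acc ha hk
    rw [PySem.List.pyRange_one_cons (a := a) (b := b) (by push_cast at hk; omega), List.foldl_cons]
    rw [if_pos (show a ≥ i by omega)]
    rw [ih (a + 1) b (c + 1) (acc ++ [c + 1]) (by omega) (by push_cast at hk ⊢; omega)]
    rw [show PySem.List.pyRange (c + 1) (c + 1 + ((m : Nat) + 1 : Nat)) 1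
          = (c + 1) :: PySem.List.pyRange (c + 1 + 1) (c + 1 + 1 + (m : Nat)) 1 by
        rw [PySem.List.pyRange_one_cons (a := c + 1) (b := c + 1 + ((m : Nat) + 1 : Nat)) (by push_cast; omega)]
        congr 1
        congr 1
        push_cast
        omega]
    simp only [Prod.mk.injEq]
    constructor
    · simp
    · push_cast; omega

-- A's full inner loop for row i (0 ≤ i ≤ n): i zeros then the run of length n - i.
theorem pv_inner (n i c : Int) (hi : 0 ≤ i) (hin : i ≤ n) :
    (PySem.List.pyRange 0 n 1).foldl
      (fun (st2 : List Int × Int) j =>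
        if j ≥ i then (st2.1 ++ [st2.2 + 1], st2.2 + 1) else (st2.1 ++ [0], st2.2))
      ([], c)
    = (List.replicate i.toNat 0 ++ PySem.List.pyRange (c + 1) (c + 1 + (n - i)) 1,
       c + (n - i)) := by
  rw [PySem.List.pyRange_one_append 0 i n hi hin, List.foldl_append]
  rw [pv_inner_zeros i i.toNat 0 i c [] le_rfl (by omega)]
  rw [pv_inner_run i (n - i).toNat i n c _ le_rfl (by omega)]
  have h1 : (((n - i).toNat : Nat) : Int) = n - i := by omega
  rw [h1]
  simp

-- Mapping the closed-form cell over j ∈ [a, b) with b ≤ i gives b - a zeros.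
theorem pv_map_zeros (i s : Int) (k : Nat) :
    ∀ (a b : Int), b ≤ i → b - a = k →
    (PySem.List.pyRange a b 1).map (fun j => if j < i then 0 else s + (j - i))
      = List.replicate k 0 := by
  induction k with
  | zero =>
    intro a b _ hk
    rw [PySem.List.pyRange_one_eq_nil (by omega)]
    simp
  | succ m ih =>
    intro a b hb hk
    rw [PySem.List.pyRange_one_cons (a := a) (b := b) (by push_cast at hk; omega), List.map_cons]
    rw [if_pos (show a < i by push_cast at hk; omega)]
    rw [ih (a + 1) b hb (by push_cast at hk ⊢; omega)]
    simp [List.replicate_succ]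

-- Mapping the closed-form cell over j ∈ [a, b) with i ≤ a gives the ascending run.
theorem pv_map_run (i s : Int) (k : Nat) :
    ∀ (a b : Int), i ≤ a → b - a = k →
    (PySem.List.pyRange a b 1).map (fun j => if j < i then 0 else s + (j - i))
      = PySem.List.pyRange (s + (a - i)) (s + (a - i) + k) 1 := by
  induction k with
  | zero =>
    intro a b _ hk
    rw [PySem.List.pyRange_one_eq_nil (by omega), PySem.List.pyRange_one_eq_nil (by push_cast; omega)]
    simp
  | succ m ih =>
    intro a b ha hk
    rw [PySem.List.pyRange_one_cons (a := a) (b := b) (by push_cast at hk; omega), List.map_cons]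
    rw [if_neg (show ¬ a < i by omega)]
    rw [ih (a + 1) b (by omega) (by push_cast at hk ⊢; omega)]
    rw [PySem.List.pyRange_one_cons (a := s + (a - i)) (b := s + (a - i) + ((m : Nat) + 1 : Nat))
          (by push_cast; omega)]
    congr 2 <;> push_cast <;> omega

-- B's row i (0 ≤ i ≤ n) with run start s: i zeros then pyRange s (s + (n - i)).
theorem pv_row (n i s : Int) (hi : 0 ≤ i) (hin : i ≤ n) :
    (PySem.List.pyRange 0 n 1).map (fun j => if j < i then 0 else s + (j - i))
      = List.replicate i.toNat 0 ++ PySem.List.pyRange s (s + (n - i)) 1 := by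
  rw [PySem.List.pyRange_one_append 0 i n hi hin, List.map_append]
  rw [pv_map_zeros i s i.toNat 0 i (le_refl i) (by omega)]
  rw [pv_map_run i s (n - i).toNat i n (le_refl i) (by omega)]
  have h1 : (((n - i).toNat : Nat) : Int) = n - i := by omega
  rw [h1]
  congr 2 <;> omega

-- The triangular floordiv steps by i: (i+1)*i // 2 = i*(i-1) // 2 + i.
theorem pv_fdiv_step (i : Int) :
    PySem.Int.floordiv ((i + 1) * i) 2 = PySem.Int.floordiv (i * (i - 1)) 2 + i := by
  obtain ⟨m, hm⟩ : ∃ m, i * (i - 1) = 2 * m := by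
    rcases Int.even_or_odd i with ⟨k, hk⟩ | ⟨k, hk⟩
    · exact ⟨k * (i - 1), by rw [hk]; ring⟩
    · exact ⟨i * k, by rw [hk]; ring⟩
  have h1 : PySem.Int.floordiv (i * (i - 1)) 2 = m := by
    rw [PySem.Int.floordiv_eq_iff_of_pos (by omega)]
    omega
  have h2 : PySem.Int.floordiv ((i + 1) * i) 2 = m + i := by
    rw [PySem.Int.floordiv_eq_iff_of_pos (by omega)]
    have : (i + 1) * i = 2 * m + 2 * i := by rw [← hm]; ring
    omega
  rw [h1, h2]

-- A's outer loop over rows i ∈ [i₀, n) produces B's closed-form rows when A's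
-- counter equals the triangular count i*n - i*(i-1)//2 of cells already numbered.
theorem pv_outer (n : Int) (k : Nat) :
    ∀ (i c : Int) (acc : List (List Int)), 0 ≤ i → i + k = n →
    c = i * n - PySem.Int.floordiv (i * (i - 1)) 2 →
    ((PySem.List.pyRange i n 1).foldl (pvStepA n) (acc, c)).1
      = acc ++ (PySem.List.pyRange i n 1).map (pvRowB n) := by
  induction k with
  | zero =>
    intro i c acc _ h _
    rw [PySem.List.pyRange_one_eq_nil (by omega)]
    simp
  | succ m ih =>
    intro i c acc hi h hc
    rw [PySem.List.pyRange_one_cons (a := i) (b := n) (by push_cast at h; omega), List.foldl_cons,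
        List.map_cons]
    have hrow : pvRowB n i
        = List.replicate i.toNat 0 ++ PySem.List.pyRange (c + 1) (c + 1 + (n - i)) 1 := by
      unfold pvRowB
      have hfun : (fun j => if j < i then 0
              else i * n - PySem.Int.floordiv (i * (i - 1)) 2 + j - i + 1)
          = (fun j => if j < i then (0 : Int) else (c + 1) + (j - i)) := by
        funext j
        by_cases hj : j < i
        · simp [hj]
        · simp only [if_neg hj]
          omega
      rw [hfun]
      exact pv_row n i (c + 1) hi (by push_cast at h; omega)
    have hA : pvStepA n (acc, c) i
        = (acc ++ [List.replicate i.toNat 0 ++ PySem.List.pyRange (c + 1) (c + 1 + (n - i)) 1],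
           c + (n - i)) := by
      show (acc ++ [_], _) = _
      rw [pv_inner n i c hi (by push_cast at h; omega)]
    rw [hA, ← hrow]
    have hc' : c + (n - i) = (i + 1) * n - PySem.Int.floordiv ((i + 1) * i) 2 := by
      rw [pv_fdiv_step i]
      have : (i + 1) * n = i * n + n := by ring
      omega
    have := ih (i + 1) (c + (n - i)) (acc ++ [pvRowB n i]) (by omega)
      (by push_cast at h ⊢; omega)
      (by rw [hc']; congr 2; ring_nf)
    rw [this]
    simp

-- ===== VERDICT (by name: the statement is the Claim_ definition above) =====
theorem pattern3_spec : Claim_equal_pattern3 := by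
  intro n _
  unfold Spec_pattern3
  have hA : pattern3 n = ((PySem.List.pyRange 0 n 1).foldl (pvStepA n) ([], 0)).1 := rfl
  have hB : pattern3_alt n = (PySem.List.pyRange 0 n 1).map (pvRowB n) := rfl
  rw [hA, hB]
  by_cases hn : n ≤ 0
  · rw [PySem.List.pyRange_one_eq_nil hn]
    simp
  · rw [pv_outer n n.toNat 0 0 [] le_rfl (by omega)
      (by have h0 : PySem.Int.floordiv ((0 : Int) * (0 - 1)) 2 = 0 := by
            rw [PySem.Int.floordiv_eq_iff_of_pos (by omega)]; omega
          rw [h0]; ring)]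
    simp
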